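-- pv_equiv track=rewrite | github.com/yz4004/codeforce-python | daily/problem_list/2025/1121.py | solve
-- ===== SOURCE A (Python) =====
-- from functools import cache
--
-- def solve(L,R):
--     # a+b = a xor b
--     if L > R: L, R = R, L
--
--     def check(L, R):
--         if L < 0 or R < 0:
--             return 0
--
--         if L > R: L, R = R,L
--         sa, sb = [int(c) for c in str(bin(L)[2:])], [int(c) for c in str(bin(R)[2:])]
--         m = len(sb)
--
--         sa = (m - len(sa)) * [0] + sa
--
--
--         @cache
--         def f(i, is_limit_a, is_limit_b):
--             if i == m:
--                 return 1
--
--             res = 0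
--             hi_a = 1 if not is_limit_a else sa[i]
--             hi_b = 1 if not is_limit_b else sb[i]
--
--             # 如果要引入 is_num 必须改 lo 的逻辑
--
--             for ca in range(0, hi_a+1):
--                 for cb in range(0, hi_b + 1):
--                     if ca + cb == ca ^ cb:
--                         res += f(i+1, is_limit_a and ca==sa[i], is_limit_b and cb==sb[i])
--             return res
--         return f(0,True, True)
--
--     # [L,R]
--     return check(R,R) - check(L-1,R) * 2 + check(L-1,L-1)
-- ===== SOURCE B (Python) =====
-- from functools import cache
--
-- def solve(L, R):
--     # a+b == a^b  <=>  a & b == 0; count pairs (a,b) with L<=a,b<=R in a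
--     # single digit DP over the bits of R with lower- and upper-tightness flags.
--     if L > R: L, R = R, L
--     if R < 0:
--         return 0
--     lo = max(L, 0)
--     sb = [int(c) for c in bin(R)[2:]]
--     m = len(sb)
--     sa = (m - len(bin(lo)[2:])) * [0] + [int(c) for c in bin(lo)[2:]]
--
--     @cache
--     def f(i, la, ua, lb, ub):
--         if i == m:
--             return 1
--         res = 0
--         alo = sa[i] if la else 0
--         ahi = sb[i] if ua else 1
--         blo = sa[i] if lb else 0
--         bhi = sb[i] if ub else 1
--         for ca in range(alo, ahi + 1):
--             for cb in range(blo, bhi + 1):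
--                 if ca & cb == 0:
--                     res += f(i + 1, la and ca == sa[i], ua and ca == sb[i],
--                              lb and cb == sa[i], ub and cb == sb[i])
--         return res
--
--     return f(0, True, True, True, True)
-- ===== Notes on version B (the rewrite author's own statement) =====
-- stated objective: alternative
-- what changed: Replaces the three-way inclusion-exclusion check(R,R)-2*check(L-1,R)+check(L-1,L-1) of upper-bounded digit DPs by one single digit DP over the bits of R that carries lower- and upper-tightness flags for both a and b, counting pairs with L<=a,b<=R directly.
import Mathlib
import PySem

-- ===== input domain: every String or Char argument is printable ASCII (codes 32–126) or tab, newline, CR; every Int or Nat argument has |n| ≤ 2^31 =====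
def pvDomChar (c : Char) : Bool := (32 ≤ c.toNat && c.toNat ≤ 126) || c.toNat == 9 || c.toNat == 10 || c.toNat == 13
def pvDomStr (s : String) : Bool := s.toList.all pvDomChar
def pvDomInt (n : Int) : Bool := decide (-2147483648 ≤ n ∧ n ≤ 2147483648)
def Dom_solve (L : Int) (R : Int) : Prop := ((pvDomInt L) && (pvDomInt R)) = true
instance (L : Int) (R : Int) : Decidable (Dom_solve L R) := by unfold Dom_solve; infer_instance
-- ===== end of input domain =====

-- B replaces A's inclusion-exclusion of three upper-bounded digit DPs by one digit DP
-- carrying lower- and upper-tightness flags for both coordinates (objective: alternative).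

-- ===== PORT A =====

-- bin(n)[2:] as a big-endian list of binary digits
def pvToBin (n : Nat) : List Nat :=
  if h : n < 2 then [n] else pvToBin (n / 2) ++ [n % 2]
decreasing_by omega

-- A's inner f(i, is_limit_a, is_limit_b). functools.cache is realized by computing,
-- once per bit level, the table of f's values for the four (is_limit_a, is_limit_b) states.
def checkT : List Nat → List Nat → List Nat
  | a :: sa, b :: sb =>
    let nxt := checkT sa sb
    let g := fun (la lb : Bool) =>
      let hiA := if la then a else 1
      let hiB := if lb then b else 1
      (List.range (hiA + 1)).foldl (fun res ca =>
        (List.range (hiB + 1)).foldl (fun res cb =>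
          if ca + cb = ca ^^^ cb then
            res + nxt.getD ((if la && decide (ca = a) then 2 else 0)
              + (if lb && decide (cb = b) then 1 else 0)) 0
          else res) res) 0
    [g false false, g false true, g true false, g true true]
  | _, _ => [1, 1, 1, 1]

def checkF (sa sb : List Nat) (la lb : Bool) : Nat :=
  (checkT sa sb).getD ((if la then 2 else 0) + (if lb then 1 else 0)) 0

-- A's check(L, R)
def pvCheck (X : Int) (Y : Int) : Int :=
  if X < 0 ∨ Y < 0 then 0
  else
    let p := if X > Y then (Y, X) else (X, Y)
    let sa := pvToBin p.1.toNat
    let sb := pvToBin p.2.toNat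
    let sa' := List.replicate (sb.length - sa.length) 0 ++ sa
    ((checkF sa' sb true true : Nat) : Int)

def solve (L : Int) (R : Int) : Int :=
  let p := if L > R then (R, L) else (L, R)
  pvCheck p.2 p.2 - pvCheck (p.1 - 1) p.2 * 2 + pvCheck (p.1 - 1) (p.1 - 1)

-- ===== PORT B =====

-- B's f(i, la, ua, lb, ub): one DP, four tightness flags. functools.cache is realized by
-- computing, once per bit level, the table of f's values for the sixteen flag states.
def altT : List Nat → List Nat → List Nat
  | a :: sa, b :: sb =>
    let nxt := altT sa sb
    let g := fun (la ua lb ub : Bool) =>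
      let loA := if la then a else 0
      let hiA := if ua then b else 1
      let loB := if lb then a else 0
      let hiB := if ub then b else 1
      (List.range' loA (hiA + 1 - loA)).foldl (fun res ca =>
        (List.range' loB (hiB + 1 - loB)).foldl (fun res cb =>
          if ca &&& cb = 0 then
            res + nxt.getD ((if la && decide (ca = a) then 8 else 0)
              + (if ua && decide (ca = b) then 4 else 0)
              + (if lb && decide (cb = a) then 2 else 0)
              + (if ub && decide (cb = b) then 1 else 0)) 0
          else res) res) 0
    [g false false false false, g false false false true,
     g false false true false, g false false true true,
     g false true false false, g false true false true,
     g false true true false, g false true true true,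
     g true false false false, g true false false true,
     g true false true false, g true false true true,
     g true true false false, g true true false true,
     g true true true false, g true true true true]
  | _, _ => List.replicate 16 1

def altF (sa sb : List Nat) (la ua lb ub : Bool) : Nat :=
  (altT sa sb).getD ((if la then 8 else 0) + (if ua then 4 else 0)
    + (if lb then 2 else 0) + (if ub then 1 else 0)) 0

def solve_alt (L : Int) (R : Int) : Int :=
  let p := if L > R then (R, L) else (L, R)
  if p.2 < 0 then 0
  else
    let lo := max p.1 0
    let sb := pvToBin p.2.toNat
    let sa0 := pvToBin lo.toNat
    let sa := List.replicate (sb.length - sa0.length) 0 ++ sa0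
    ((altF sa sb true true true true : Nat) : Int)

-- ===== PRECONDITION & SPEC =====
def Spec_solve (L : Int) (R : Int) (out : Int) : Prop := out = solve_alt L R
instance (L : Int) (R : Int) (out : Int) : Decidable (Spec_solve L R out) := by unfold Spec_solve; infer_instance

-- ===== CLAIM (what is proved, stated in full; the proofs are below) =====
def Claim_equal_solve : Prop := ∀ (L : Int) (R : Int), Dom_solve L R → Spec_solve L R (solve L R)

-- ===== LEMMAS AND PROOFS =====

-- pure (uncached) forms of the two DP recursions, and their equality to the ports
def pvRecA : List Nat → List Nat → Bool → Bool → Nat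
  | a :: sa, b :: sb, la, lb =>
    let hiA := if la then a else 1
    let hiB := if lb then b else 1
    (List.range (hiA + 1)).foldl (fun res ca =>
      (List.range (hiB + 1)).foldl (fun res cb =>
        if ca + cb = ca ^^^ cb then
          res + pvRecA sa sb (la && decide (ca = a)) (lb && decide (cb = b))
        else res) res) 0
  | _, _, _, _ => 1

def pvRecB : List Nat → List Nat → Bool → Bool → Bool → Bool → Nat
  | a :: sa, b :: sb, la, ua, lb, ub =>
    let loA := if la then a else 0
    let hiA := if ua then b else 1
    let loB := if lb then a else 0
    let hiB := if ub then b else 1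
    (List.range' loA (hiA + 1 - loA)).foldl (fun res ca =>
      (List.range' loB (hiB + 1 - loB)).foldl (fun res cb =>
        if ca &&& cb = 0 then
          res + pvRecB sa sb (la && decide (ca = a)) (ua && decide (ca = b))
                         (lb && decide (cb = a)) (ub && decide (cb = b))
        else res) res) 0
  | _, _, _, _, _, _ => 1

theorem checkT_getD : ∀ (sb sa : List Nat) (la lb : Bool),
    (checkT sa sb).getD ((if la then 2 else 0) + (if lb then 1 else 0)) 0
      = pvRecA sa sb la lb := by
  intro sb
  induction sb with
  | nil => intro sa la lb; cases sa <;> cases la <;> cases lb <;> rfl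
  | cons b sb ih =>
    intro sa la lb
    cases sa with
    | nil => cases la <;> cases lb <;> rfl
    | cons a sa' =>
      cases la <;> cases lb <;> simp only [checkT, pvRecA, ih] <;> rfl

theorem checkF_eq (sa sb : List Nat) (la lb : Bool) :
    checkF sa sb la lb = pvRecA sa sb la lb := checkT_getD sb sa la lb

theorem altT_getD : ∀ (sb sa : List Nat) (la ua lb ub : Bool),
    (altT sa sb).getD ((if la then 8 else 0) + (if ua then 4 else 0)
        + (if lb then 2 else 0) + (if ub then 1 else 0)) 0
      = pvRecB sa sb la ua lb ub := by
  intro sb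
  induction sb with
  | nil => intro sa la ua lb ub; cases sa <;> cases la <;> cases ua <;> cases lb <;> cases ub <;> rfl
  | cons b sb ih =>
    intro sa la ua lb ub
    cases sa with
    | nil => cases la <;> cases ua <;> cases lb <;> cases ub <;> rfl
    | cons a sa' =>
      cases la <;> cases ua <;> cases lb <;> cases ub <;>
        simp only [altT, pvRecB, ih] <;> rfl

theorem altF_eq (sa sb : List Nat) (la ua lb ub : Bool) :
    altF sa sb la ua lb ub = pvRecB sa sb la ua lb ub := altT_getD sb sa la ua lb ub

-- value of a big-endian digit list
def pvVal (s : List Nat) : Nat := s.foldl (fun a d => 2 * a + d) 0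
def pvIsBits (s : List Nat) : Prop := ∀ d ∈ s, d ≤ 1

theorem pvVal_foldl (s : List Nat) : ∀ a : Nat,
    s.foldl (fun a d => 2 * a + d) a = a * 2 ^ s.length + pvVal s := by
  induction s with
  | nil => intro a; simp [pvVal]
  | cons d t ih =>
    intro a
    simp only [List.foldl_cons, List.length_cons, pvVal] at *
    rw [ih (2 * a + d), ih (2 * 0 + d)]
    ring

theorem pvVal_cons (d : Nat) (s : List Nat) :
    pvVal (d :: s) = d * 2 ^ s.length + pvVal s := by
  simp only [pvVal, List.foldl_cons]
  simpa using pvVal_foldl s (2 * 0 + d)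

theorem pvVal_lt {s : List Nat} (h : pvIsBits s) : pvVal s < 2 ^ s.length := by
  induction s with
  | nil => simp [pvVal]
  | cons d t ih =>
    have hd : d ≤ 1 := h d (by simp)
    have ht : pvVal t < 2 ^ t.length := ih (fun x hx => h x (by simp [hx]))
    rw [pvVal_cons]
    simp only [List.length_cons, pow_succ]
    interval_cases d <;> omega

theorem pvVal_append (s t : List Nat) :
    pvVal (s ++ t) = pvVal s * 2 ^ t.length + pvVal t := by
  simp only [pvVal, List.foldl_append]
  simpa using pvVal_foldl t (List.foldl (fun a d => 2 * a + d) 0 s)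

theorem pvVal_replicate (k : Nat) : pvVal (List.replicate k 0) = 0 := by
  induction k with
  | zero => simp [pvVal]
  | succ n ih => rw [List.replicate_succ, pvVal_cons, ih]; simp

theorem pvToBin_bits (n : Nat) : pvIsBits (pvToBin n) := by
  induction n using pvToBin.induct with
  | case1 n h =>
    intro d hd
    unfold pvToBin at hd
    rw [dif_pos h] at hd
    simp at hd
    omega
  | case2 n h ih =>
    intro d hd
    unfold pvToBin at hd
    rw [dif_neg h] at hd
    rcases List.mem_append.mp hd with h1 | h1
    · exact ih d h1
    · simp at h1; omega

theorem pvToBin_val (n : Nat) : pvVal (pvToBin n) = n := by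
  induction n using pvToBin.induct with
  | case1 n h => unfold pvToBin; simp [h, pvVal]
  | case2 n h ih =>
    unfold pvToBin
    rw [dif_neg h, pvVal_append, ih]
    simp [pvVal]
    omega

theorem pvToBin_len_pos (n : Nat) : 1 ≤ (pvToBin n).length := by
  unfold pvToBin
  split <;> simp

theorem pvToBin_lt (n : Nat) : n < 2 ^ (pvToBin n).length := by
  have := pvVal_lt (pvToBin_bits n)
  rwa [pvToBin_val] at this

theorem pvToBin_low (n : Nat) (h : 1 ≤ n) : 2 ^ ((pvToBin n).length - 1) ≤ n := by
  induction n using pvToBin.induct with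
  | case1 n hn =>
    unfold pvToBin; rw [dif_pos hn]; simpa using h
  | case2 n hn ih =>
    unfold pvToBin
    rw [dif_neg hn]
    have h2 : 1 ≤ n / 2 := by omega
    have := ih h2
    have hl : 1 ≤ (pvToBin (n / 2)).length := pvToBin_len_pos _
    simp only [List.length_append, List.length_cons, List.length_nil]
    have : 2 ^ ((pvToBin (n / 2)).length - 1 + 1) ≤ n / 2 * 2 := by
      rw [pow_succ]; omega
    have he : (pvToBin (n / 2)).length - 1 + 1 = (pvToBin (n / 2)).length := by omega
    rw [he] at this
    have : (pvToBin (n / 2)).length + 1 - 1 = (pvToBin (n / 2)).length := by omega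
    rw [this]
    omega

theorem pvToBin_len_mono {m n : Nat} (h : m ≤ n) :
    (pvToBin m).length ≤ (pvToBin n).length := by
  by_contra hc
  push_neg at hc
  rcases Nat.eq_zero_or_pos m with rfl | hm
  · have h0 : (pvToBin 0).length = 1 := by unfold pvToBin; simp
    have := pvToBin_len_pos n
    omega
  · have h1 := pvToBin_low m hm
    have h2 := pvToBin_lt n
    have h3 : (pvToBin n).length ≤ (pvToBin m).length - 1 := by omega
    have := Nat.pow_le_pow_right (by norm_num : 1 ≤ 2) h3
    omega

-- decidable spec predicates (abbrev so `if` finds decidability)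
abbrev pvSpecA (sa sb : List Nat) (la lb : Bool) (x y : Nat) : Prop :=
  x &&& y = 0 ∧ (la = true → x ≤ pvVal sa) ∧ (lb = true → y ≤ pvVal sb)

abbrev pvSpecB (sa sb : List Nat) (la ua lb ub : Bool) (x y : Nat) : Prop :=
  x &&& y = 0 ∧ (la = true → pvVal sa ≤ x) ∧ (ua = true → x ≤ pvVal sb)
    ∧ (lb = true → pvVal sa ≤ y) ∧ (ub = true → y ≤ pvVal sb)

def pvCntA (sa sb : List Nat) (la lb : Bool) : Nat :=
  ∑ x ∈ Finset.range (2 ^ sb.length), ∑ y ∈ Finset.range (2 ^ sb.length),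
    if pvSpecA sa sb la lb x y then 1 else 0

def pvCntB (sa sb : List Nat) (la ua lb ub : Bool) : Nat :=
  ∑ x ∈ Finset.range (2 ^ sb.length), ∑ y ∈ Finset.range (2 ^ sb.length),
    if pvSpecB sa sb la ua lb ub x y then 1 else 0

-- bit-head splitting of &&&
theorem pvLand_low {n x y : Nat} (hy : y < 2 ^ n) : (2 ^ n + x) &&& y = x &&& y := by
  apply Nat.eq_of_testBit_eq
  intro i
  rcases lt_or_ge i n with h | h
  · rw [Nat.testBit_land, Nat.testBit_land, Nat.testBit_two_pow_add_gt h]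
  · have hyb : y.testBit i = false :=
      Nat.testBit_eq_false_of_lt (lt_of_lt_of_le hy (Nat.pow_le_pow_right (by norm_num) h))
    simp [hyb]

theorem pvLand_both {n x y : Nat} (hx : x < 2 ^ n) (hy : y < 2 ^ n) :
    (2 ^ n + x) &&& (2 ^ n + y) ≠ 0 := by
  intro h
  have ht : ((2 ^ n + x) &&& (2 ^ n + y)).testBit n = true := by
    rw [Nat.testBit_land, Nat.testBit_two_pow_add_eq, Nat.testBit_two_pow_add_eq,
      Nat.testBit_eq_false_of_lt hx, Nat.testBit_eq_false_of_lt hy]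
    rfl
  rw [h] at ht
  simp at ht

theorem pvLand_head {n x y c d : Nat} (hx : x < 2 ^ n) (hy : y < 2 ^ n)
    (hc : c ≤ 1) (hd : d ≤ 1) :
    ((c * 2 ^ n + x) &&& (d * 2 ^ n + y) = 0) ↔ (c &&& d = 0 ∧ x &&& y = 0) := by
  interval_cases c <;> interval_cases d <;>
    simp only [Nat.zero_mul, Nat.one_mul, Nat.zero_add]
  · simp
  · rw [Nat.land_comm, pvLand_low hx, Nat.land_comm]; simp
  · rw [pvLand_low hy]; simp
  · constructor
    · intro h; exact absurd h (pvLand_both hx hy)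
    · rintro ⟨h, -⟩; simp at h

-- head decomposition of the two bound shapes
theorem pvPiece_lower {n : Nat} {s : List Nat} (hs : pvVal s < 2 ^ n) (hlen : s.length = n)
    {d ca x : Nat} (hx : x < 2 ^ n) (hd : d ≤ 1) (hca : ca ≤ 1) (fl : Bool) :
    (fl = true → pvVal (d :: s) ≤ ca * 2 ^ n + x)
      ↔ ((fl = true → d ≤ ca) ∧ ((fl && decide (ca = d)) = true → pvVal s ≤ x)) := by
  rw [pvVal_cons, hlen]
  cases fl <;> interval_cases d <;> interval_cases ca <;> simp <;> omega

theorem pvPiece_upper {n : Nat} {s : List Nat} (hs : pvVal s < 2 ^ n) (hlen : s.length = n)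
    {d ca x : Nat} (hx : x < 2 ^ n) (hd : d ≤ 1) (hca : ca ≤ 1) (fl : Bool) :
    (fl = true → ca * 2 ^ n + x ≤ pvVal (d :: s))
      ↔ ((fl = true → ca ≤ d) ∧ ((fl && decide (ca = d)) = true → x ≤ pvVal s)) := by
  rw [pvVal_cons, hlen]
  cases fl <;> interval_cases d <;> interval_cases ca <;> simp <;> omega

theorem pvSpecB_cons {sa sb : List Nat} {a b : Nat}
    (hlen : sa.length = sb.length) (hsa : pvVal sa < 2 ^ sb.length)
    (hsb : pvVal sb < 2 ^ sb.length) (ha : a ≤ 1) (hb : b ≤ 1)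
    {ca cb x y : Nat} (hx : x < 2 ^ sb.length) (hy : y < 2 ^ sb.length)
    (hca : ca ≤ 1) (hcb : cb ≤ 1) (la ua lb ub : Bool) :
    pvSpecB (a :: sa) (b :: sb) la ua lb ub
        (ca * 2 ^ sb.length + x) (cb * 2 ^ sb.length + y)
      ↔ (((la = true → a ≤ ca) ∧ (ua = true → ca ≤ b) ∧ (lb = true → a ≤ cb)
            ∧ (ub = true → cb ≤ b) ∧ ca &&& cb = 0)
          ∧ pvSpecB sa sb (la && decide (ca = a)) (ua && decide (ca = b))
              (lb && decide (cb = a)) (ub && decide (cb = b)) x y) := by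
  unfold pvSpecB
  rw [pvLand_head hx hy hca hcb,
    pvPiece_lower hsa hlen hx ha hca la, pvPiece_upper hsb rfl hx hb hca ua,
    pvPiece_lower hsa hlen hy ha hcb lb, pvPiece_upper hsb rfl hy hb hcb ub]
  tauto

theorem pvSpecA_cons {sa sb : List Nat} {a b : Nat}
    (hlen : sa.length = sb.length) (hsa : pvVal sa < 2 ^ sb.length)
    (hsb : pvVal sb < 2 ^ sb.length) (ha : a ≤ 1) (hb : b ≤ 1)
    {ca cb x y : Nat} (hx : x < 2 ^ sb.length) (hy : y < 2 ^ sb.length)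
    (hca : ca ≤ 1) (hcb : cb ≤ 1) (la lb : Bool) :
    pvSpecA (a :: sa) (b :: sb) la lb
        (ca * 2 ^ sb.length + x) (cb * 2 ^ sb.length + y)
      ↔ (((la = true → ca ≤ a) ∧ (lb = true → cb ≤ b) ∧ ca &&& cb = 0)
          ∧ pvSpecA sa sb (la && decide (ca = a)) (lb && decide (cb = b)) x y) := by
  unfold pvSpecA
  rw [pvLand_head hx hy hca hcb,
    pvPiece_upper hsa hlen hx ha hca la, pvPiece_upper hsb rfl hy hb hcb lb]
  tauto

-- sum splitting over range (2^(n+1)), keeping the ca*2^n+x shape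
theorem pvSum_split (n : Nat) (f : Nat → Nat) :
    ∑ x ∈ Finset.range (2 ^ (n + 1)), f x
      = (∑ x ∈ Finset.range (2 ^ n), f (0 * 2 ^ n + x))
        + ∑ x ∈ Finset.range (2 ^ n), f (1 * 2 ^ n + x) := by
  rw [pow_succ, mul_two, Finset.sum_range_add]
  simp

theorem pvSum_ind_and (N : Nat) (G : Prop) [Decidable G]
    (P Q : Nat → Nat → Prop) [∀ x y, Decidable (P x y)] [∀ x y, Decidable (Q x y)]
    (h : ∀ x y, x < N → y < N → (P x y ↔ (G ∧ Q x y))) :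
    (∑ x ∈ Finset.range N, ∑ y ∈ Finset.range N, if P x y then 1 else 0)
      = if G then (∑ x ∈ Finset.range N, ∑ y ∈ Finset.range N, if Q x y then 1 else 0)
        else 0 := by
  by_cases hG : G
  · rw [if_pos hG]
    refine Finset.sum_congr rfl (fun x hx => Finset.sum_congr rfl (fun y hy => ?_))
    rw [Finset.mem_range] at hx hy
    simp [h x y hx hy, hG]
  · rw [if_neg hG]
    refine Finset.sum_eq_zero (fun x hx => Finset.sum_eq_zero (fun y hy => ?_))
    rw [Finset.mem_range] at hx hy
    simp [h x y hx hy, hG]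

-- step lemmas: one unfolding of the DPs as four guarded terms
set_option maxHeartbeats 1000000 in
theorem pvRecB_step (a b : Nat) (sa sb : List Nat) (la ua lb ub : Bool)
    (ha : a ≤ 1) (hb : b ≤ 1) :
    pvRecB (a :: sa) (b :: sb) la ua lb ub =
      (if ((la = true → a ≤ 0) ∧ (ua = true → 0 ≤ b) ∧ (lb = true → a ≤ 0)
            ∧ (ub = true → 0 ≤ b) ∧ 0 &&& 0 = 0) then
          pvRecB sa sb (la && decide (0 = a)) (ua && decide (0 = b))
            (lb && decide (0 = a)) (ub && decide (0 = b)) else 0)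
      + ((if ((la = true → a ≤ 0) ∧ (ua = true → 0 ≤ b) ∧ (lb = true → a ≤ 1)
            ∧ (ub = true → 1 ≤ b) ∧ 0 &&& 1 = 0) then
          pvRecB sa sb (la && decide (0 = a)) (ua && decide (0 = b))
            (lb && decide (1 = a)) (ub && decide (1 = b)) else 0)
      + ((if ((la = true → a ≤ 1) ∧ (ua = true → 1 ≤ b) ∧ (lb = true → a ≤ 0)
            ∧ (ub = true → 0 ≤ b) ∧ 1 &&& 0 = 0) then
          pvRecB sa sb (la && decide (1 = a)) (ua && decide (1 = b))
            (lb && decide (0 = a)) (ub && decide (0 = b)) else 0)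
      + (if ((la = true → a ≤ 1) ∧ (ua = true → 1 ≤ b) ∧ (lb = true → a ≤ 1)
            ∧ (ub = true → 1 ≤ b) ∧ 1 &&& 1 = 0) then
          pvRecB sa sb (la && decide (1 = a)) (ua && decide (1 = b))
            (lb && decide (1 = a)) (ub && decide (1 = b)) else 0))) := by
  have r01 : List.range' 0 1 = [0] := rfl
  have r02 : List.range' 0 2 = [0, 1] := rfl
  have r10 : List.range' 1 0 = [] := rfl
  have r11 : List.range' 1 1 = [1] := rfl
  cases la <;> cases ua <;> cases lb <;> cases ub <;>
    interval_cases a <;> interval_cases b <;>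
      simp [pvRecB, r01, r02, r10, r11] <;> omega

set_option maxHeartbeats 1000000 in
theorem pvRecA_step (a b : Nat) (sa sb : List Nat) (la lb : Bool)
    (ha : a ≤ 1) (hb : b ≤ 1) :
    pvRecA (a :: sa) (b :: sb) la lb =
      (if ((la = true → 0 ≤ a) ∧ (lb = true → 0 ≤ b) ∧ 0 &&& 0 = 0) then
          pvRecA sa sb (la && decide (0 = a)) (lb && decide (0 = b)) else 0)
      + ((if ((la = true → 0 ≤ a) ∧ (lb = true → 1 ≤ b) ∧ 0 &&& 1 = 0) then
          pvRecA sa sb (la && decide (0 = a)) (lb && decide (1 = b)) else 0)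
      + ((if ((la = true → 1 ≤ a) ∧ (lb = true → 0 ≤ b) ∧ 1 &&& 0 = 0) then
          pvRecA sa sb (la && decide (1 = a)) (lb && decide (0 = b)) else 0)
      + (if ((la = true → 1 ≤ a) ∧ (lb = true → 1 ≤ b) ∧ 1 &&& 1 = 0) then
          pvRecA sa sb (la && decide (1 = a)) (lb && decide (1 = b)) else 0))) := by
  have g1 : List.range 1 = [0] := rfl
  have g2 : List.range 2 = [0, 1] := rfl
  cases la <;> cases lb <;>
    interval_cases a <;> interval_cases b <;>
      simp [pvRecA, g1, g2] <;> omega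

-- the two DPs compute their bound-counting specs
theorem pvRecB_cnt : ∀ (sb sa : List Nat), sa.length = sb.length →
    pvIsBits sa → pvIsBits sb → ∀ la ua lb ub,
    pvRecB sa sb la ua lb ub = pvCntB sa sb la ua lb ub := by
  intro sb
  induction sb with
  | nil =>
    intro sa h _ _ la ua lb ub
    cases sa with
    | nil =>
      cases la <;> cases ua <;> cases lb <;> cases ub <;>
        simp [pvRecB, pvCntB, pvSpecB, pvVal] <;> decide
    | cons a t => simp at h
  | cons b sb ih =>
    intro sa hlen hba hbb la ua lb ub
    cases sa with
    | nil => simp at hlen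
    | cons a sa' =>
      have hlen' : sa'.length = sb.length := by simpa using hlen
      have ha : a ≤ 1 := hba a (by simp)
      have hb : b ≤ 1 := hbb b (by simp)
      have hba' : pvIsBits sa' := fun d hd => hba d (by simp [hd])
      have hbb' : pvIsBits sb := fun d hd => hbb d (by simp [hd])
      have hva : pvVal sa' < 2 ^ sb.length := hlen' ▸ pvVal_lt hba'
      have hvb : pvVal sb < 2 ^ sb.length := pvVal_lt hbb'
      rw [pvRecB_step a b sa' sb la ua lb ub ha hb]
      unfold pvCntB
      rw [show (b :: sb).length = sb.length + 1 from rfl]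
      rw [pvSum_split]
      simp only [pvSum_split sb.length]
      rw [Finset.sum_add_distrib, Finset.sum_add_distrib]
      have h00 := fun (x y : Nat) (hx : x < 2 ^ sb.length) (hy : y < 2 ^ sb.length) => pvSpecB_cons (ca := 0) (cb := 0)
        hlen' hva hvb ha hb hx hy (by norm_num) (by norm_num) la ua lb ub
      have h01 := fun (x y : Nat) (hx : x < 2 ^ sb.length) (hy : y < 2 ^ sb.length) => pvSpecB_cons (ca := 0) (cb := 1)
        hlen' hva hvb ha hb hx hy (by norm_num) (by norm_num) la ua lb ub
      have h10 := fun (x y : Nat) (hx : x < 2 ^ sb.length) (hy : y < 2 ^ sb.length) => pvSpecB_cons (ca := 1) (cb := 0)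
        hlen' hva hvb ha hb hx hy (by norm_num) (by norm_num) la ua lb ub
      have h11 := fun (x y : Nat) (hx : x < 2 ^ sb.length) (hy : y < 2 ^ sb.length) => pvSpecB_cons (ca := 1) (cb := 1)
        hlen' hva hvb ha hb hx hy (by norm_num) (by norm_num) la ua lb ub
      rw [pvSum_ind_and _ _ _ _ h00, pvSum_ind_and _ _ _ _ h01,
        pvSum_ind_and _ _ _ _ h10, pvSum_ind_and _ _ _ _ h11]
      simp only [ih sa' hlen' hba' hbb']
      unfold pvCntB
      omega

theorem pvRecA_cnt : ∀ (sb sa : List Nat), sa.length = sb.length →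
    pvIsBits sa → pvIsBits sb → ∀ la lb,
    pvRecA sa sb la lb = pvCntA sa sb la lb := by
  intro sb
  induction sb with
  | nil =>
    intro sa h _ _ la lb
    cases sa with
    | nil =>
      cases la <;> cases lb <;>
        simp [pvRecA, pvCntA, pvSpecA, pvVal] <;> decide
    | cons a t => simp at h
  | cons b sb ih =>
    intro sa hlen hba hbb la lb
    cases sa with
    | nil => simp at hlen
    | cons a sa' =>
      have hlen' : sa'.length = sb.length := by simpa using hlen
      have ha : a ≤ 1 := hba a (by simp)
      have hb : b ≤ 1 := hbb b (by simp)
      have hba' : pvIsBits sa' := fun d hd => hba d (by simp [hd])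
      have hbb' : pvIsBits sb := fun d hd => hbb d (by simp [hd])
      have hva : pvVal sa' < 2 ^ sb.length := hlen' ▸ pvVal_lt hba'
      have hvb : pvVal sb < 2 ^ sb.length := pvVal_lt hbb'
      rw [pvRecA_step a b sa' sb la lb ha hb]
      unfold pvCntA
      rw [show (b :: sb).length = sb.length + 1 from rfl]
      rw [pvSum_split]
      simp only [pvSum_split sb.length]
      rw [Finset.sum_add_distrib, Finset.sum_add_distrib]
      have h00 := fun (x y : Nat) (hx : x < 2 ^ sb.length) (hy : y < 2 ^ sb.length) => pvSpecA_cons (ca := 0) (cb := 0)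
        hlen' hva hvb ha hb hx hy (by norm_num) (by norm_num) la lb
      have h01 := fun (x y : Nat) (hx : x < 2 ^ sb.length) (hy : y < 2 ^ sb.length) => pvSpecA_cons (ca := 0) (cb := 1)
        hlen' hva hvb ha hb hx hy (by norm_num) (by norm_num) la lb
      have h10 := fun (x y : Nat) (hx : x < 2 ^ sb.length) (hy : y < 2 ^ sb.length) => pvSpecA_cons (ca := 1) (cb := 0)
        hlen' hva hvb ha hb hx hy (by norm_num) (by norm_num) la lb
      have h11 := fun (x y : Nat) (hx : x < 2 ^ sb.length) (hy : y < 2 ^ sb.length) => pvSpecA_cons (ca := 1) (cb := 1)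
        hlen' hva hvb ha hb hx hy (by norm_num) (by norm_num) la lb
      rw [pvSum_ind_and _ _ _ _ h00, pvSum_ind_and _ _ _ _ h01,
        pvSum_ind_and _ _ _ _ h10, pvSum_ind_and _ _ _ _ h11]
      simp only [ih sa' hlen' hba' hbb']
      unfold pvCntA
      omega

-- restriction of indicator sums to the live window
theorem pvSum_restrict_le (N K : Nat) (hK : K < N) (f : Nat → Nat)
    (hf : ∀ x, K < x → f x = 0) :
    ∑ x ∈ Finset.range N, f x = ∑ x ∈ Finset.range (K + 1), f x := by
  simp only [Finset.range_eq_Ico]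
  rw [← Finset.sum_Ico_consecutive f (Nat.zero_le (K + 1)) (by omega)]
  have h0 : ∑ x ∈ Finset.Ico (K + 1) N, f x = 0 :=
    Finset.sum_eq_zero (fun x hx => hf x (by have := Finset.mem_Ico.mp hx; omega))
  omega

theorem pvSum_restrict_Ico (N l r : Nat) (hr : r < N) (hlr : l ≤ r + 1) (f : Nat → Nat)
    (hf : ∀ x, x < l ∨ r < x → f x = 0) :
    ∑ x ∈ Finset.range N, f x = ∑ x ∈ Finset.Ico l (r + 1), f x := by
  rw [Finset.range_eq_Ico,
    ← Finset.sum_Ico_consecutive f (Nat.zero_le l) (show l ≤ N by omega),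
    ← Finset.sum_Ico_consecutive f (show l ≤ r + 1 by omega) (show r + 1 ≤ N by omega)]
  have h0 : ∑ x ∈ Finset.Ico 0 l, f x = 0 :=
    Finset.sum_eq_zero (fun x hx => hf x (Or.inl (Finset.mem_Ico.mp hx).2))
  have h1 : ∑ x ∈ Finset.Ico (r + 1) N, f x = 0 :=
    Finset.sum_eq_zero (fun x hx => hf x (Or.inr (by have := Finset.mem_Ico.mp hx; omega)))
  omega

-- canonical pair counts
def pvC (X Y : Nat) : Nat :=
  ∑ x ∈ Finset.range (X + 1), ∑ y ∈ Finset.range (Y + 1), if x &&& y = 0 then 1 else 0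

def pvD (l r : Nat) : Nat :=
  ∑ x ∈ Finset.Ico l (r + 1), ∑ y ∈ Finset.Ico l (r + 1), if x &&& y = 0 then 1 else 0

theorem pvCntA_eval (sa sb : List Nat) (hlen : sa.length = sb.length)
    (hba : pvIsBits sa) (hbb : pvIsBits sb) :
    pvCntA sa sb true true = pvC (pvVal sa) (pvVal sb) := by
  have hvb : pvVal sb < 2 ^ sb.length := pvVal_lt hbb
  have hva : pvVal sa < 2 ^ sb.length := hlen ▸ pvVal_lt hba
  unfold pvCntA pvC
  rw [pvSum_restrict_le _ (pvVal sa) hva _ (fun x hx => Finset.sum_eq_zero (fun y _ => by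
      rw [if_neg]; intro h; exact absurd (h.2.1 rfl) (by omega)))]
  refine Finset.sum_congr rfl (fun x hx => ?_)
  rw [Finset.mem_range] at hx
  rw [pvSum_restrict_le _ (pvVal sb) hvb _ (fun y hy => by
      rw [if_neg]; intro h; exact absurd (h.2.2 rfl) (by omega))]
  refine Finset.sum_congr rfl (fun y hy => ?_)
  rw [Finset.mem_range] at hy
  have hiff : pvSpecA sa sb true true x y ↔ x &&& y = 0 := by
    unfold pvSpecA
    exact ⟨fun h => h.1, fun h => ⟨h, fun _ => by omega, fun _ => by omega⟩⟩
  rw [if_congr hiff rfl rfl]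

theorem pvCntB_eval (sa sb : List Nat) (hlen : sa.length = sb.length)
    (hba : pvIsBits sa) (hbb : pvIsBits sb) (hle : pvVal sa ≤ pvVal sb) :
    pvCntB sa sb true true true true = pvD (pvVal sa) (pvVal sb) := by
  have hvb : pvVal sb < 2 ^ sb.length := pvVal_lt hbb
  unfold pvCntB pvD
  rw [pvSum_restrict_Ico _ (pvVal sa) (pvVal sb) hvb (by omega) _
      (fun x hx => Finset.sum_eq_zero (fun y _ => by
        rw [if_neg]; intro h
        rcases hx with hx | hx
        · exact absurd (h.2.1 rfl) (by omega)
        · exact absurd (h.2.2.1 rfl) (by omega)))]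
  refine Finset.sum_congr rfl (fun x hx => ?_)
  rw [Finset.mem_Ico] at hx
  rw [pvSum_restrict_Ico _ (pvVal sa) (pvVal sb) hvb (by omega) _ (fun y hy => by
      rw [if_neg]; intro h
      rcases hy with hy | hy
      · exact absurd (h.2.2.2.1 rfl) (by omega)
      · exact absurd (h.2.2.2.2 rfl) (by omega))]
  refine Finset.sum_congr rfl (fun y hy => ?_)
  rw [Finset.mem_Ico] at hy
  have hiff : pvSpecB sa sb true true true true x y ↔ x &&& y = 0 := by
    unfold pvSpecB
    exact ⟨fun h => h.1,
      fun h => ⟨h, fun _ => by omega, fun _ => by omega, fun _ => by omega, fun _ => by omega⟩⟩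
  rw [if_congr hiff rfl rfl]

theorem pvC_comm (X Y : Nat) : pvC X Y = pvC Y X := by
  unfold pvC
  rw [Finset.sum_comm]
  exact Finset.sum_congr rfl (fun x _ => Finset.sum_congr rfl (fun y _ => by
    rw [Nat.land_comm]))

theorem pvD_zero (r : Nat) : pvD 0 r = pvC r r := by
  unfold pvD pvC
  simp only [Finset.range_eq_Ico]

-- inclusion–exclusion over the split range [0,r] = [0,l) ∪ [l,r]
theorem pvIE (l r : Nat) (h1 : 1 ≤ l) (h2 : l ≤ r) :
    pvD l r + (pvC (l - 1) r + pvC r (l - 1)) = pvC r r + pvC (l - 1) (l - 1) := by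
  have hsplit : ∀ f : Nat → Nat, ∑ x ∈ Finset.range (r + 1), f x
      = ∑ x ∈ Finset.range l, f x + ∑ x ∈ Finset.Ico l (r + 1), f x := by
    intro f
    simp only [Finset.range_eq_Ico]
    rw [← Finset.sum_Ico_consecutive f (Nat.zero_le l) (by omega)]
  have hl1 : l - 1 + 1 = l := by omega
  have E : ∀ A : Finset Nat,
      ∑ x ∈ A, ∑ y ∈ Finset.range (r + 1), (if x &&& y = 0 then 1 else 0)
        = ∑ x ∈ A, ∑ y ∈ Finset.range l, (if x &&& y = 0 then 1 else 0)
          + ∑ x ∈ A, ∑ y ∈ Finset.Ico l (r + 1), (if x &&& y = 0 then 1 else 0) := by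
    intro A
    rw [← Finset.sum_add_distrib]
    exact Finset.sum_congr rfl (fun x _ => hsplit _)
  unfold pvD pvC
  rw [hl1]
  rw [E (Finset.range l), E (Finset.range (r + 1)),
    hsplit (fun x => ∑ y ∈ Finset.range l, if x &&& y = 0 then 1 else 0),
    hsplit (fun x => ∑ y ∈ Finset.Ico l (r + 1), if x &&& y = 0 then 1 else 0)]
  omega

-- padding facts
theorem pvPad (X Y : Nat) (hXY : X ≤ Y) :
    (List.replicate ((pvToBin Y).length - (pvToBin X).length) 0 ++ pvToBin X).length
        = (pvToBin Y).length
    ∧ pvIsBits (List.replicate ((pvToBin Y).length - (pvToBin X).length) 0 ++ pvToBin X)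
    ∧ pvVal (List.replicate ((pvToBin Y).length - (pvToBin X).length) 0 ++ pvToBin X) = X := by
  have hm := pvToBin_len_mono hXY
  refine ⟨?_, ?_, ?_⟩
  · simp only [List.length_append, List.length_replicate]; omega
  · intro d hd
    rcases List.mem_append.mp hd with h | h
    · have := List.eq_of_mem_replicate h; omega
    · exact pvToBin_bits X d h
  · rw [pvVal_append, pvVal_replicate, pvToBin_val]; simp

theorem pvNegCheck (X Y : Int) (h : X < 0 ∨ Y < 0) : pvCheck X Y = 0 := by
  unfold pvCheck
  rw [if_pos h]

theorem pvCheck_eval (X Y : Int) (h0 : 0 ≤ X) (hXY : X ≤ Y) :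
    pvCheck X Y = (pvC X.toNat Y.toNat : Int) := by
  have hn : X.toNat ≤ Y.toNat := by omega
  obtain ⟨plen, pbits, pval⟩ := pvPad X.toNat Y.toNat hn
  unfold pvCheck
  rw [if_neg (by omega), if_neg (show ¬ X > Y by omega)]
  show ((checkF (List.replicate ((pvToBin Y.toNat).length - (pvToBin X.toNat).length) 0
      ++ pvToBin X.toNat) (pvToBin Y.toNat) true true : Nat) : Int) = _
  rw [checkF_eq, pvRecA_cnt _ _ plen pbits (pvToBin_bits _) true true,
    pvCntA_eval _ _ plen pbits (pvToBin_bits _), pval, pvToBin_val]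

-- the post-swap bodies agree
theorem pvCore (L R : Int) (hLR : L ≤ R) :
    pvCheck R R - pvCheck (L - 1) R * 2 + pvCheck (L - 1) (L - 1)
      = (if R < 0 then (0 : Int) else
          ((altF (List.replicate ((pvToBin R.toNat).length - (pvToBin (max L 0).toNat).length) 0
              ++ pvToBin (max L 0).toNat) (pvToBin R.toNat) true true true true : Nat) : Int)) := by
  by_cases hR : R < 0
  · rw [if_pos hR, pvNegCheck R R (Or.inl hR), pvNegCheck (L - 1) R (Or.inr hR),
      pvNegCheck (L - 1) (L - 1) (Or.inl (by omega))]
    ring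
  · rw [if_neg hR]
    have hR' : (0 : Int) ≤ R := by omega
    have hm1 : (0 : Int) ≤ max L 0 := le_max_right _ _
    have hm2 : max L 0 ≤ R := max_le hLR hR'
    have hn : (max L 0).toNat ≤ R.toNat := by omega
    obtain ⟨plen, pbits, pval⟩ := pvPad (max L 0).toNat R.toNat hn
    rw [altF_eq, pvRecB_cnt _ _ plen pbits (pvToBin_bits _) true true true true,
      pvCntB_eval _ _ plen pbits (pvToBin_bits _) (by rw [pval, pvToBin_val]; exact hn),
      pval, pvToBin_val]
    by_cases hL : L ≤ 0
    · have hmx : max L 0 = 0 := max_eq_right hL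
      rw [hmx, pvNegCheck (L - 1) R (Or.inl (by omega)),
        pvNegCheck (L - 1) (L - 1) (Or.inl (by omega)), pvCheck_eval R R hR' le_rfl]
      have h0 : (0 : Int).toNat = 0 := rfl
      rw [h0, pvD_zero]
      ring
    · have hmx : max L 0 = L := max_eq_left (by omega)
      rw [hmx, pvCheck_eval R R hR' le_rfl, pvCheck_eval (L - 1) R (by omega) (by omega),
        pvCheck_eval (L - 1) (L - 1) (by omega) le_rfl]
      have ht : (L - 1).toNat = L.toNat - 1 := by omega
      rw [ht]
      have hie := pvIE L.toNat R.toNat (by omega) (by omega)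
      have hsym := pvC_comm (L.toNat - 1) R.toNat
      omega

-- ===== VERDICT (by name: the statement is the Claim_ definition above) =====
theorem solve_spec : Claim_equal_solve := by
  intro L R _
  unfold Spec_solve solve solve_alt
  by_cases h : L > R
  · simp only [if_pos h]
    exact pvCore R L (by omega)
  · simp only [if_neg h]
    exact pvCore L R (by omega)
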